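-- pv_equiv track=rewrite | github.com/DaroMateo/PROGRAMACION1 | PROGRAMACION1REC/biblioteca/cadena_de_caracteres.py | convertir_mayuscula
-- ===== SOURCE A (Python) =====
-- def contar_caracteres (variable:str)->int:
--     """
--     Cuenta la cantidad de caracteres de un string
--
--     Parameters:
--     variable (str): el string a contar
--     Returns:
--     int: la cantidad de caracteres en el string
--     """
--     contador = 0
--     for _ in variable:
--         contador  = contador + 1
--
--     return contador
--
-- def convertir_mayuscula (variable:str):
--     """
--     Convierte todos los caracteres de un string a mayuscula
--
--     Parameters:
--     variable (str): el string a convertir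
--     Returns:
--     str: el string convertido a mayuscula
--     """
--     cantidad = contar_caracteres(variable)
--     mayuscula = ''
--     for i in range (cantidad):
--         if ord(variable[i]) >= 97 and ord(variable[i]) <= 122:
--             letra = chr(ord(variable[i])-32)
--             mayuscula += letra
--         else:
--             mayuscula += variable[i]
--
--     return mayuscula
-- ===== SOURCE B (Python) =====
-- _TABLE = str.maketrans("abcdefghijklmnopqrstuvwxyz", "ABCDEFGHIJKLMNOPQRSTUVWXYZ")
--
-- def convertir_mayuscula(variable: str) -> str:
--     return variable.translate(_TABLE)
-- ===== Notes on version B (the rewrite author's own statement) =====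
-- stated objective: idiomatic
-- what changed: Replaces the hand-counted length plus indexed loop with a per-character ord-range branch by a translation table built once with str.maketrans and a single variable.translate call, moving the per-character work into the C-level translate loop.
import Mathlib
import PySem

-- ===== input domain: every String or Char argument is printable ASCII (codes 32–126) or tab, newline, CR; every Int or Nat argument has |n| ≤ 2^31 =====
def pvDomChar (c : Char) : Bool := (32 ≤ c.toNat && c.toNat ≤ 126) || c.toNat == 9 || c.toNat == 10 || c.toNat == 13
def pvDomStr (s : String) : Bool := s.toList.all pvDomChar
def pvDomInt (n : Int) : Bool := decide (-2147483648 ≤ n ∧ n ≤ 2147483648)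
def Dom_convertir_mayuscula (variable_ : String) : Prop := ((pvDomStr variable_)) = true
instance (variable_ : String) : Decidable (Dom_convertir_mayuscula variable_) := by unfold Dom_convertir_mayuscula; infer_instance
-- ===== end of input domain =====

-- B builds a str.maketrans translation table once and applies it with one translate pass, instead of A's hand-counted length plus indexed loop with an ord-range branch.

-- ===== PORT A =====
def contar_caracteres (variable_ : String) : Int :=
  variable_.toList.foldl (fun contador _ => contador + 1) 0

def convertir_mayuscula (variable_ : String) : String :=
  let cantidad := contar_caracteres variable_
  let mayuscula := (PySem.List.pyRange 0 cantidad 1).foldl (fun mayuscula i =>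
    let ch := PySem.List.pyGetD variable_.toList i ' '
    if 97 ≤ ch.toNat && ch.toNat ≤ 122 then
      mayuscula ++ [Char.ofNat (ch.toNat - 32)]
    else
      mayuscula ++ [ch]) ([] : List Char)
  String.ofList mayuscula

-- ===== PORT B =====
-- str.maketrans("abc…z", "ABC…Z"): the ordinal-keyed translation table, built once
def pvTabla : PySem.Dict Int Char :=
  PySem.Dict.ofList
    (List.zip "abcdefghijklmnopqrstuvwxyz".toList "ABCDEFGHIJKLMNOPQRSTUVWXYZ".toList
      |>.map (fun p => ((p.1.toNat : Int), p.2)))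

-- variable.translate(_TABLE): one table-driven pass, untabled characters pass through
def convertir_mayuscula_alt (variable_ : String) : String :=
  String.ofList (variable_.toList.map (fun c => (pvTabla.get? (c.toNat : Int)).getD c))

-- ===== PRECONDITION & SPEC =====
def Spec_convertir_mayuscula (variable_ : String) (out : String) : Prop := out = convertir_mayuscula_alt variable_
instance (variable_ : String) (out : String) : Decidable (Spec_convertir_mayuscula variable_ out) := by unfold Spec_convertir_mayuscula; infer_instance

-- ===== CLAIM (what is proved, stated in full; the proofs are below) =====
def Claim_equal_convertir_mayuscula : Prop := ∀ (variable_ : String), Dom_convertir_mayuscula variable_ → Spec_convertir_mayuscula variable_ (convertir_mayuscula variable_)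

-- ===== LEMMAS AND PROOFS =====
lemma contar_aux (l : List Char) (a : Int) : l.foldl (fun contador _ => contador + 1) a = a + l.length := by
  induction l generalizing a with
  | nil => simp
  | cons x xs ih => simp [List.foldl_cons, ih]; omega

lemma contar_eq (variable_ : String) : contar_caracteres variable_ = (variable_.toList.length : Int) := by
  unfold contar_caracteres
  rw [contar_aux]
  omega

lemma foldl_if_append (p : Char → Bool) (f : Char → Char) (l : List Char) (acc : List Char) :
    l.foldl (fun acc ch => if p ch then acc ++ [f ch] else acc ++ [ch]) acc
      = acc ++ l.map (fun ch => if p ch then f ch else ch) := by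
  induction l generalizing acc with
  | nil => simp
  | cons x xs ih =>
      simp only [List.foldl_cons, List.map_cons, ih]
      by_cases h : p x <;> simp [h]

lemma tabla_eq : pvTabla = PySem.Dict.mk [((97:Int),'A'),(98,'B'),(99,'C'),(100,'D'),(101,'E'),(102,'F'),(103,'G'),(104,'H'),(105,'I'),(106,'J'),(107,'K'),(108,'L'),(109,'M'),(110,'N'),(111,'O'),(112,'P'),(113,'Q'),(114,'R'),(115,'S'),(116,'T'),(117,'U'),(118,'V'),(119,'W'),(120,'X'),(121,'Y'),(122,'Z')] := by decide

set_option maxHeartbeats 800000 in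
lemma pointwise (c : Char) :
    (pvTabla.get? (c.toNat : Int)).getD c =
      (if 97 ≤ c.toNat && c.toNat ≤ 122 then Char.ofNat (c.toNat - 32) else c) := by
  rw [tabla_eq]
  by_cases hc : 97 ≤ c.toNat ∧ c.toNat ≤ 122
  · have he : c = Char.ofNat c.toNat := (Char.ofNat_toNat c).symm
    rw [he]
    obtain ⟨h1, h2⟩ := hc
    interval_cases (c.toNat) <;> decide
  · have hfalse : (97 ≤ c.toNat && c.toNat ≤ 122) = false := by
      simp only [Bool.and_eq_false_iff, decide_eq_false_iff_not]; omega
    rw [hfalse]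
    simp only [Bool.false_eq_true, if_false]
    have hn : (PySem.Dict.mk [((97:Int),'A'),(98,'B'),(99,'C'),(100,'D'),(101,'E'),(102,'F'),(103,'G'),(104,'H'),(105,'I'),(106,'J'),(107,'K'),(108,'L'),(109,'M'),(110,'N'),(111,'O'),(112,'P'),(113,'Q'),(114,'R'),(115,'S'),(116,'T'),(117,'U'),(118,'V'),(119,'W'),(120,'X'),(121,'Y'),(122,'Z')]).get? (c.toNat : Int) = none := by
      simp only [PySem.Dict.get?_mk_cons, beq_iff_eq]
      repeat rw [if_neg (by omega)]
      rfl
    rw [hn]; rfl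

-- ===== VERDICT (by name: the statement is the Claim_ definition above) =====
theorem convertir_mayuscula_spec : Claim_equal_convertir_mayuscula := by
  intro v _
  unfold Spec_convertir_mayuscula convertir_mayuscula convertir_mayuscula_alt
  dsimp only
  rw [contar_eq]
  rw [PySem.List.foldl_pyRange_zero_pyGetD' v.toList ' '
    (fun acc ch => if 97 ≤ ch.toNat && ch.toNat ≤ 122 then acc ++ [Char.ofNat (ch.toNat - 32)] else acc ++ [ch]) []]
  rw [foldl_if_append]
  simp only [List.nil_append]
  congr 1
  exact List.map_congr_left (fun c _ => (pointwise c).symm)
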